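-- pv_equiv track=rewrite | github.com/diego-famaf/Programacion2ITS | UNIDAD 4 - Recursion y paradigma funcional/ejercicios_recursion_entrenamiento.py | val_absoluto
-- ===== SOURCE A (Python) =====
-- def val_absoluto(l:list)->list:
--     if l==[]:
--         solucion = []
--     elif l[0]>=0 :
--         solucion = [l[0]] + val_absoluto(l[1:])
--     else:
--         solucion = [(l[0]*(-1))] + val_absoluto(l[1:])
--     return solucion
-- ===== SOURCE B (Python) =====
-- def val_absoluto(l: list) -> list:
--     solucion = []
--     for x in l:
--         if x >= 0:
--             solucion.append(x)
--         else:
--             solucion.append(x * (-1))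
--     return solucion
-- ===== Notes on version B (the rewrite author's own statement) =====
-- stated objective: faster
-- what changed: Replaced the tail recursion with repeated list slicing/concatenation by a single forward iterative loop appending to an accumulator list, keeping the same per-element >=0 branch.
import Mathlib
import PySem

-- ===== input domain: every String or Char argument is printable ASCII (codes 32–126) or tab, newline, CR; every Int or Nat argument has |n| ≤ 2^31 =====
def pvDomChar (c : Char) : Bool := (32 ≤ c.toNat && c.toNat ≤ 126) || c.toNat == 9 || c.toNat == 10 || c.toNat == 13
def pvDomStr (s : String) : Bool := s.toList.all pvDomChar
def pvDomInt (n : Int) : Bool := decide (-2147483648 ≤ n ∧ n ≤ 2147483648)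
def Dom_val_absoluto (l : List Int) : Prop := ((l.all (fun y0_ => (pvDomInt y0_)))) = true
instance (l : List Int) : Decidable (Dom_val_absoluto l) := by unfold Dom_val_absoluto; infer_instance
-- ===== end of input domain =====

-- B replaces A's tail recursion (with list slicing and concatenation) by a single
-- forward iterative loop appending to an accumulator; same per-element >=0 branch.

-- ===== PORT A =====
-- A: recursion on the list; empty -> [], head >= 0 -> keep it, else head*(-1); cons with the recursive call on the tail.
def val_absoluto (l : List Int) : List Int :=
  match l with
  | [] => []
  | x :: rest =>
    if x ≥ 0 then [x] ++ val_absoluto rest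
    else [x * (-1)] ++ val_absoluto rest

-- ===== PORT B =====
-- B: one forward pass over l, appending to the accumulator 'solucion'.
def val_absoluto_alt (l : List Int) : List Int :=
  l.foldl (fun solucion x => if x ≥ 0 then solucion ++ [x] else solucion ++ [x * (-1)]) []

-- ===== PRECONDITION & SPEC =====
def Spec_val_absoluto (l : List Int) (out : List Int) : Prop := out = val_absoluto_alt l
instance (l : List Int) (out : List Int) : Decidable (Spec_val_absoluto l out) := by unfold Spec_val_absoluto; infer_instance

-- ===== CLAIM (what is proved, stated in full; the proofs are below) =====
def Claim_equal_val_absoluto : Prop := ∀ (l : List Int), Dom_val_absoluto l → Spec_val_absoluto l (val_absoluto l)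

-- ===== LEMMAS AND PROOFS =====
-- Loop invariant: B's fold starting from any accumulator returns acc ++ A's result.
theorem val_absoluto_alt_loop (l : List Int) (acc : List Int) :
    l.foldl (fun solucion x => if x ≥ 0 then solucion ++ [x] else solucion ++ [x * (-1)]) acc
      = acc ++ val_absoluto l := by
  induction l generalizing acc with
  | nil => simp [val_absoluto]
  | cons x rest ih =>
    simp only [List.foldl_cons, val_absoluto]
    by_cases h : x ≥ 0
    · rw [if_pos h, if_pos h, ih, List.append_assoc]
    · rw [if_neg h, if_neg h, ih, List.append_assoc]

-- ===== VERDICT (by name: the statement is the Claim_ definition above) =====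
theorem val_absoluto_spec : Claim_equal_val_absoluto := by
  intro l _
  unfold Spec_val_absoluto val_absoluto_alt
  rw [val_absoluto_alt_loop, List.nil_append]
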